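-- pv_equiv track=rewrite | github.com/ibrahimirdem/flask-numaradan-isim | fonksiyonlar.py | numarami
-- ===== SOURCE A (Python) =====
-- def numarami(deger):
--     deger = str(deger)
--     sayilar = "0123456789"
--     sonuc = 0
--     if len(deger) == 10:
--         for i in deger:
--             if i not in sayilar:
--                 sonuc=sonuc+1
--         if sonuc > 0:
--             return False
--         else:
--             return True
--     else:
--         return False
-- ===== SOURCE B (Python) =====
-- import re
--
-- _TEN_DIGITS = re.compile(r'[0-9]{10}')
--
-- def numarami(deger):
--     return _TEN_DIGITS.fullmatch(str(deger)) is not None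
-- ===== Notes on version B (the rewrite author's own statement) =====
-- stated objective: idiomatic
-- what changed: Replaces the explicit length test plus per-character counting loop with a single precompiled regular expression fullmatch r'[0-9]{10}'.
import Mathlib
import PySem

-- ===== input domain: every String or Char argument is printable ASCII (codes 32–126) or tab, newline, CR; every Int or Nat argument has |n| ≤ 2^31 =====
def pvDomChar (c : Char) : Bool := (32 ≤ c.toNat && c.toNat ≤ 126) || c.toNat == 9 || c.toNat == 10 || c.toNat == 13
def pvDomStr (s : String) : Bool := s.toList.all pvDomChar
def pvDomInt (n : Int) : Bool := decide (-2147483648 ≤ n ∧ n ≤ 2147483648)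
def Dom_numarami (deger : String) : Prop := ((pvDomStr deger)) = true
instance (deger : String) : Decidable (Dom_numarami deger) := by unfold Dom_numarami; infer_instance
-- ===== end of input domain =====

-- ===== PORT A =====
-- A: length==10 guard, then count characters not in "0123456789"; true iff the count is 0.
def numarami (deger : String) : Bool :=
  let sayilar := "0123456789".toList
  if deger.toList.length == 10 then
    let sonuc := deger.toList.foldl (fun s c => if sayilar.contains c then s else s + 1) 0
    if sonuc > 0 then false else true
  else false

-- ===== PORT B =====
-- B: re.fullmatch(r'[0-9]{10}', s): exactly 10 characters, each in the ASCII class [0-9].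
def numarami_alt (deger : String) : Bool :=
  deger.toList.length == 10 && deger.toList.all (fun c => '0' ≤ c && c ≤ '9')

-- ===== PRECONDITION & SPEC =====
def Spec_numarami (deger : String) (out : Bool) : Prop := out = numarami_alt deger
instance (deger : String) (out : Bool) : Decidable (Spec_numarami deger out) := by unfold Spec_numarami; infer_instance

-- ===== CLAIM (what is proved, stated in full; the proofs are below) =====
def Claim_equal_numarami : Prop := ∀ (deger : String), Dom_numarami deger → Spec_numarami deger (numarami deger)

-- ===== LEMMAS AND PROOFS =====
set_option maxRecDepth 4000 in
theorem pv_contains_eq (c : Char) :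
    ("0123456789".toList.contains c) = (('0' ≤ c && c ≤ '9') : Bool) := by
  have h : "0123456789".toList = ['0','1','2','3','4','5','6','7','8','9'] := by decide
  rw [h]
  have hn : ∀ d : Char, (c == d) = decide (c.toNat = d.toNat) := by
    intro d
    rw [Bool.eq_iff_iff, beq_iff_eq, decide_eq_true_iff]
    exact ⟨fun h => by rw [h], fun h => Char.ext (UInt32.toNat_inj.mp h)⟩
  simp only [List.contains_cons, List.contains_nil, Bool.or_false, hn,
    Char.le_def, UInt32.le_iff_toNat_le]
  rw [Bool.eq_iff_iff]
  simp only [Bool.or_eq_true, decide_eq_true_eq, Bool.and_eq_true]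
  have ec : c.toNat = c.val.toNat := rfl
  have e0 : ('0' : Char).val.toNat = 48 := by decide
  have e9 : ('9' : Char).val.toNat = 57 := by decide
  have d0 : ('0' : Char).toNat = 48 := by decide
  have d1 : ('1' : Char).toNat = 49 := by decide
  have d2 : ('2' : Char).toNat = 50 := by decide
  have d3 : ('3' : Char).toNat = 51 := by decide
  have d4 : ('4' : Char).toNat = 52 := by decide
  have d5 : ('5' : Char).toNat = 53 := by decide
  have d6 : ('6' : Char).toNat = 54 := by decide
  have d7 : ('7' : Char).toNat = 55 := by decide
  have d8 : ('8' : Char).toNat = 56 := by decide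
  have d9 : ('9' : Char).toNat = 57 := by decide
  omega

theorem pv_count (l : List Char) (n : Nat) :
    l.foldl (fun s c => if ("0123456789".toList).contains c then s else s + 1) n
      = n + l.countP (fun c => !("0123456789".toList).contains c) := by
  induction l generalizing n with
  | nil => simp
  | cons a t ih =>
    by_cases h : ("0123456789".toList).contains a = true
    · rw [List.foldl_cons, if_pos h, ih, List.countP_cons,
        if_neg (show ¬((!("0123456789".toList).contains a) = true) by rw [h]; decide),
        Nat.add_zero]
    · rw [List.foldl_cons, if_neg h, ih, List.countP_cons,
        if_pos (by rw [Bool.not_eq_true', Bool.eq_false_iff]; exact h)]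
      omega

-- ===== VERDICT (by name: the statement is the Claim_ definition above) =====
theorem numarami_spec : Claim_equal_numarami := by
  intro deger _
  unfold Spec_numarami numarami numarami_alt
  simp only
  by_cases hl : (deger.toList.length == 10) = true
  · rw [if_pos hl, pv_count, Nat.zero_add]
    by_cases hp : deger.toList.countP (fun c => !("0123456789".toList).contains c) = 0
    · rw [if_neg (by omega)]
      have h := List.countP_eq_zero.mp hp
      symm
      rw [Bool.and_eq_true]
      refine ⟨hl, List.all_eq_true.mpr ?_⟩
      intro c hc
      have hcc := h c hc
      simp only [Bool.not_eq_true'] at hcc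
      rw [← pv_contains_eq]
      exact Bool.ne_false_iff.mp hcc
    · rw [if_pos (by omega)]
      cases hA : (deger.toList.all (fun c => '0' ≤ c && c ≤ '9')) with
      | false => rw [Bool.and_false]
      | true =>
        exfalso
        apply hp
        rw [List.countP_eq_zero]
        intro c hc
        have hct : ("0123456789".toList).contains c = true :=
          (pv_contains_eq c).trans (List.all_eq_true.mp hA c hc)
        simp only [Bool.not_eq_true', hct]
        decide
  · rw [if_neg hl]
    symm
    rw [Bool.eq_false_iff.mpr hl, Bool.false_and]
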